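-- pv_equiv track=rewrite | github.com/dtunkelang/y2karaoke | src/y2karaoke/core/whisper_integration.py | _build_word_assignments_from_syllable_path
-- ===== SOURCE A (Python) =====
-- from typing import List, Optional, Tuple, Dict, Any, Set, Sequence, Iterable
--
-- def _build_word_assignments_from_syllable_path(
--     path: List[Tuple[int, int]],
--     lrc_syllables: List[Dict],
--     whisper_syllables: List[Dict],
-- ) -> Dict[int, List[int]]:
--     assignments: Dict[int, Set[int]] = {}
--     for lrc_idx, whisper_idx in path:
--         lrc_token = lrc_syllables[lrc_idx]
--         whisper_token = whisper_syllables[whisper_idx]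
--         for word_idx in lrc_token["word_idxs"]:
--             assignments.setdefault(word_idx, set()).update(whisper_token["parent_idxs"])
--     return {
--         word_idx: sorted(list(indices)) for word_idx, indices in assignments.items()
--     }
-- ===== SOURCE B (Python) =====
-- def _word_idxs(lrc_syllables, lrc_idx):
--     return lrc_syllables[lrc_idx]["word_idxs"]
--
--
-- def _parent_idxs(whisper_syllables, whisper_idx):
--     return whisper_syllables[whisper_idx]["parent_idxs"]
--
--
-- def _build_word_assignments_from_syllable_path(path, lrc_syllables, whisper_syllables):
--     # Flatten the whole path into one list of (word_idx, parent_idx) pairs,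
--     # then build each word's sorted de-duplicated parent list from that flat list.
--     pairs = [
--         (w, p)
--         for lrc_idx, whisper_idx in path
--         for w in _word_idxs(lrc_syllables, lrc_idx)
--         for p in _parent_idxs(whisper_syllables, whisper_idx)
--     ]
--     order = dict.fromkeys(
--         w for lrc_idx, _ in path for w in _word_idxs(lrc_syllables, lrc_idx)
--     )
--     return {k: sorted({p for w, p in pairs if w == k}) for k in order}
-- ===== Notes on version B (the rewrite author's own statement) =====
-- stated objective: alternative
-- what changed: Replaces the incremental dict-of-sets accumulation with a flat decomposition: flatten the path into one (word_idx, parent_idx) pair list plus a first-encounter key order, then build each word's sorted deduplicated parent list by a comprehension over the flat pair list.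
import Mathlib
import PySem

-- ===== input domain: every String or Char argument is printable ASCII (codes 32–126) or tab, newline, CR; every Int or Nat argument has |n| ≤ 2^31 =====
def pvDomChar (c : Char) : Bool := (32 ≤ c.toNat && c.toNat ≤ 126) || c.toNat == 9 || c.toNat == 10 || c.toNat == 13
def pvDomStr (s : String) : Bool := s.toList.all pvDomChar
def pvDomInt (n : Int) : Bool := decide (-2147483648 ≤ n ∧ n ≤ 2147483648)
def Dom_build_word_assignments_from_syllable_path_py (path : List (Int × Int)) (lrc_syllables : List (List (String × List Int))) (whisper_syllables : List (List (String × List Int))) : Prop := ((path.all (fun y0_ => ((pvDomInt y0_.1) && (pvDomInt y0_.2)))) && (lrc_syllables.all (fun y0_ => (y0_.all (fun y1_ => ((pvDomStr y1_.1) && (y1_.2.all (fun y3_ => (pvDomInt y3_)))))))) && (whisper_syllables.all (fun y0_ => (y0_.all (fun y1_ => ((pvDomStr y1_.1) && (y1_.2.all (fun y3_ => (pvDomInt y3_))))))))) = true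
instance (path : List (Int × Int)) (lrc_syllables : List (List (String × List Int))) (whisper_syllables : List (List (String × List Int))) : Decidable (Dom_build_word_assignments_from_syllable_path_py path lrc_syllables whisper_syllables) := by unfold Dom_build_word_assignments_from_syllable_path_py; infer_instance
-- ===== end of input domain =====

-- B replaces A's incremental dict-of-sets accumulation by a flat decomposition: one flattened (word_idx, parent_idx) pair list plus a first-encounter key order, from which each word's sorted deduplicated parent list is built (alternative decomposition, same cost).


-- ===== PORT A =====
-- Python dict[str, list[int]] access t[k]: first matching key, none = KeyError
def lookupKey (t : List (String × List Int)) (k : String) : Option (List Int) :=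
  match t with
  | [] => none
  | (a, v) :: r => if a = k then some v else lookupKey r k

def build_word_assignments_from_syllable_path_py (path : List (Int × Int)) (lrc_syllables : List (List (String × List Int))) (whisper_syllables : List (List (String × List Int))) : List (Int × List Int) :=
  let assignments : PySem.Dict Int (PySem.Set Int) :=
    path.foldl (fun assignments pr =>
      let lrc_token := (PySem.List.pyGet? lrc_syllables pr.1).getD []
      let whisper_token := (PySem.List.pyGet? whisper_syllables pr.2).getD []
      let word_idxs := (lookupKey lrc_token "word_idxs").getD []
      let parent_idxs := (lookupKey whisper_token "parent_idxs").getD []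
      -- assignments.setdefault(word_idx, set()).update(parent_idxs)
      word_idxs.foldl (fun a w =>
        a.modify w PySem.Set.empty (fun s => PySem.Set.update s parent_idxs)) assignments)
      PySem.Dict.empty
  assignments.items.map (fun p => (p.1, PySem.List.sorted p.2 (fun x => x) false))

-- ===== PORT B =====
def wordIdxsAt (lrc_syllables : List (List (String × List Int))) (i : Int) : List Int :=
  (lookupKey ((PySem.List.pyGet? lrc_syllables i).getD []) "word_idxs").getD []

def parentIdxsAt (whisper_syllables : List (List (String × List Int))) (j : Int) : List Int :=
  (lookupKey ((PySem.List.pyGet? whisper_syllables j).getD []) "parent_idxs").getD []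

def build_word_assignments_from_syllable_path_py_alt (path : List (Int × Int)) (lrc_syllables : List (List (String × List Int))) (whisper_syllables : List (List (String × List Int))) : List (Int × List Int) :=
  let pairs : List (Int × Int) :=
    path.flatMap (fun pr =>
      (wordIdxsAt lrc_syllables pr.1).flatMap (fun w =>
        (parentIdxsAt whisper_syllables pr.2).map (fun p => (w, p))))
  let order : List Int :=
    PySem.List.dedup (path.flatMap (fun pr => wordIdxsAt lrc_syllables pr.1))
  order.map (fun k =>
    (k, PySem.List.sorted
          (PySem.Set.ofList (pairs.filterMap (fun q => if q.1 = k then some q.2 else none)))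
          (fun x => x) false))

-- ===== PRECONDITION & SPEC =====
-- Pre_: exactly the inputs where A returns (no IndexError on path indices, no KeyError on the tokens)
def Pre_build_word_assignments_from_syllable_path_py (path : List (Int × Int)) (lrc_syllables : List (List (String × List Int))) (whisper_syllables : List (List (String × List Int))) : Prop :=
  ∀ pr ∈ path,
    PySem.Raise.InRange lrc_syllables.length pr.1 ∧
    "word_idxs" ∈ ((PySem.List.pyGet? lrc_syllables pr.1).getD []).map Prod.fst ∧
    PySem.Raise.InRange whisper_syllables.length pr.2 ∧
    "parent_idxs" ∈ ((PySem.List.pyGet? whisper_syllables pr.2).getD []).map Prod.fst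
instance (path : List (Int × Int)) (lrc_syllables : List (List (String × List Int))) (whisper_syllables : List (List (String × List Int))) : Decidable (Pre_build_word_assignments_from_syllable_path_py path lrc_syllables whisper_syllables) := by unfold Pre_build_word_assignments_from_syllable_path_py; infer_instance

def pvWitness_build_word_assignments_from_syllable_path_py : (List (Int × Int)) × (List (List (String × List Int))) × (List (List (String × List Int))) :=
  ([(0, 0), (1, 0)], [[("word_idxs", [0, 1])], [("word_idxs", [1])]], [[("parent_idxs", [2, 0])]])

def Spec_build_word_assignments_from_syllable_path_py (path : List (Int × Int)) (lrc_syllables : List (List (String × List Int))) (whisper_syllables : List (List (String × List Int))) (out : List (Int × List Int)) : Prop := out = build_word_assignments_from_syllable_path_py_alt path lrc_syllables whisper_syllables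
instance (path : List (Int × Int)) (lrc_syllables : List (List (String × List Int))) (whisper_syllables : List (List (String × List Int))) (out : List (Int × List Int)) : Decidable (Spec_build_word_assignments_from_syllable_path_py path lrc_syllables whisper_syllables out) := by unfold Spec_build_word_assignments_from_syllable_path_py; infer_instance

-- ===== CLAIM (what is proved, stated in full; the proofs are below) =====
def Claim_equal_build_word_assignments_from_syllable_path_py : Prop := ∀ (path : List (Int × Int)) (lrc_syllables : List (List (String × List Int))) (whisper_syllables : List (List (String × List Int))), Dom_build_word_assignments_from_syllable_path_py path lrc_syllables whisper_syllables → Pre_build_word_assignments_from_syllable_path_py path lrc_syllables whisper_syllables → Spec_build_word_assignments_from_syllable_path_py path lrc_syllables whisper_syllables (build_word_assignments_from_syllable_path_py path lrc_syllables whisper_syllables)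

-- ===== LEMMAS AND PROOFS =====

-- A's per-path-element loop step
def pvStepA (lrc_syllables whisper_syllables : List (List (String × List Int))) (a : PySem.Dict Int (PySem.Set Int)) (pr : Int × Int) : PySem.Dict Int (PySem.Set Int) :=
  (wordIdxsAt lrc_syllables pr.1).foldl
    (fun a w => a.modify w PySem.Set.empty (fun s => PySem.Set.update s (parentIdxsAt whisper_syllables pr.2))) a

def pvWords (lrc_syllables : List (List (String × List Int))) (path : List (Int × Int)) : List Int :=
  path.flatMap (fun pr => wordIdxsAt lrc_syllables pr.1)

def pvPairs (lrc_syllables whisper_syllables : List (List (String × List Int))) (path : List (Int × Int)) : List (Int × Int) :=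
  path.flatMap (fun pr =>
    (wordIdxsAt lrc_syllables pr.1).flatMap (fun w =>
      (parentIdxsAt whisper_syllables pr.2).map (fun p => (w, p))))

-- getD through the inner word_idxs loop: membership grows by (k ∈ wi) × ps, Nodup is kept
theorem pv_inner_getD (ps : List Int) (wi : List Int) (d : PySem.Dict Int (PySem.Set Int)) (k : Int)
    (h : (d.getD k PySem.Set.empty).Nodup) :
    ((wi.foldl (fun a w => a.modify w PySem.Set.empty (fun s => PySem.Set.update s ps)) d).getD k PySem.Set.empty).Nodup ∧
    (∀ p, p ∈ (wi.foldl (fun a w => a.modify w PySem.Set.empty (fun s => PySem.Set.update s ps)) d).getD k PySem.Set.empty ↔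
      p ∈ d.getD k PySem.Set.empty ∨ (k ∈ wi ∧ p ∈ ps)) := by
  induction wi generalizing d with
  | nil => simpa using h
  | cons w wi ih =>
    simp only [List.foldl_cons]
    have hmod : (d.modify w PySem.Set.empty (fun s => PySem.Set.update s ps)).getD k PySem.Set.empty
        = if k = w then PySem.Set.update (d.getD w PySem.Set.empty) ps else d.getD k PySem.Set.empty := by
      exact PySem.Dict.getD_modify d w k PySem.Set.empty _
    by_cases hkw : k = w
    · subst hkw
      have h' : ((d.modify k PySem.Set.empty (fun s => PySem.Set.update s ps)).getD k PySem.Set.empty).Nodup := by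
        rw [hmod]; simpa using PySem.Set.nodup_update _ ps h
      obtain ⟨hn, hm⟩ := ih _ h'
      refine ⟨hn, fun p => ?_⟩
      rw [hm p, hmod]
      simp [PySem.Set.mem_update]
      tauto
    · have h' : ((d.modify w PySem.Set.empty (fun s => PySem.Set.update s ps)).getD k PySem.Set.empty).Nodup := by
        rw [hmod]; simpa [hkw] using h
      obtain ⟨hn, hm⟩ := ih _ h'
      refine ⟨hn, fun p => ?_⟩
      rw [hm p, hmod]
      simp only [if_neg hkw, List.mem_cons]
      tauto
-- getD through A's whole fold: membership is 'assigned somewhere along the path'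
theorem pv_fold_getD (lrc_syllables whisper_syllables : List (List (String × List Int)))
    (path : List (Int × Int)) (d : PySem.Dict Int (PySem.Set Int)) (k : Int)
    (h : (d.getD k PySem.Set.empty).Nodup) :
    ((path.foldl (pvStepA lrc_syllables whisper_syllables) d).getD k PySem.Set.empty).Nodup ∧
    (∀ p, p ∈ (path.foldl (pvStepA lrc_syllables whisper_syllables) d).getD k PySem.Set.empty ↔
      p ∈ d.getD k PySem.Set.empty ∨ (k, p) ∈ pvPairs lrc_syllables whisper_syllables path) := by
  induction path generalizing d with
  | nil => simpa [pvPairs] using h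
  | cons pr path ih =>
    simp only [List.foldl_cons]
    obtain ⟨hn1, hm1⟩ := pv_inner_getD (parentIdxsAt whisper_syllables pr.2) (wordIdxsAt lrc_syllables pr.1) d k h
    obtain ⟨hn, hm⟩ := ih (pvStepA lrc_syllables whisper_syllables d pr) hn1
    refine ⟨hn, fun p => ?_⟩
    rw [hm p]
    have : p ∈ (pvStepA lrc_syllables whisper_syllables d pr).getD k PySem.Set.empty ↔
        p ∈ d.getD k PySem.Set.empty ∨ (k ∈ wordIdxsAt lrc_syllables pr.1 ∧ p ∈ parentIdxsAt whisper_syllables pr.2) := hm1 p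
    rw [this]
    simp [pvPairs, List.mem_flatMap]
    tauto

-- keys through A's whole fold
theorem pv_fold_keys (lrc_syllables whisper_syllables : List (List (String × List Int)))
    (path : List (Int × Int)) (d : PySem.Dict Int (PySem.Set Int)) :
    (path.foldl (pvStepA lrc_syllables whisper_syllables) d).keys
      = PySem.Set.update d.keys (pvWords lrc_syllables path) := by
  induction path generalizing d with
  | nil => simp [pvWords]
  | cons pr path ih =>
    simp only [List.foldl_cons]
    rw [ih]
    have hstep : (pvStepA lrc_syllables whisper_syllables d pr).keys
        = PySem.Set.update d.keys (wordIdxsAt lrc_syllables pr.1) :=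
      PySem.Dict.keys_foldl_modify (wordIdxsAt lrc_syllables pr.1) PySem.Set.empty
        (fun _ _ s => PySem.Set.update s (parentIdxsAt whisper_syllables pr.2)) d
    rw [hstep, ← PySem.Set.update_append]
    simp [pvWords]

-- ===== VERDICT (by name: the statement is the Claim_ definition above) =====
theorem build_word_assignments_from_syllable_path_py_spec : Claim_equal_build_word_assignments_from_syllable_path_py := by
  intro path lrc_syllables whisper_syllables _ _
  unfold Spec_build_word_assignments_from_syllable_path_py
  show (path.foldl (pvStepA lrc_syllables whisper_syllables) PySem.Dict.empty).items.map
        (fun p => (p.1, PySem.List.sorted p.2 (fun x => x) false)) = _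
  set d := path.foldl (pvStepA lrc_syllables whisper_syllables) PySem.Dict.empty with hd
  have hkeys : d.keys = PySem.List.dedup (pvWords lrc_syllables path) := by
    rw [hd, pv_fold_keys, PySem.Dict.keys_empty, PySem.List.dedup_eq_ofList]
    rfl
  have hnodup : d.keys.Nodup := by
    rw [hkeys, PySem.List.dedup_eq_ofList]; exact PySem.Set.nodup_ofList _
  have hitem : ∀ p ∈ d.items, (p.1, PySem.List.sorted p.2 (fun x => x) false) =
      (p.1, PySem.List.sorted
        (PySem.Set.ofList ((pvPairs lrc_syllables whisper_syllables path).filterMap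
          (fun q => if q.1 = p.1 then some q.2 else none))) (fun x => x) false) := by
    rintro ⟨k, v⟩ hp
    have hv : d.getD k PySem.Set.empty = v :=
      PySem.Dict.getD_of_mem_items d hp hnodup PySem.Set.empty
    obtain ⟨hn, hm⟩ := pv_fold_getD lrc_syllables whisper_syllables path PySem.Dict.empty k (by simp)
    rw [← hd] at hn hm
    rw [hv] at hn hm
    have hperm : v.Perm (PySem.Set.ofList ((pvPairs lrc_syllables whisper_syllables path).filterMap
        (fun q => if q.1 = k then some q.2 else none))) := by
      rw [List.perm_ext_iff_of_nodup hn (PySem.Set.nodup_ofList _)]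
      intro p
      rw [hm p, PySem.Set.mem_ofList]
      simp only [List.mem_filterMap]
      constructor
      · rintro (h | h)
        · simp at h
        · exact ⟨(k, p), h, by simp⟩
      · rintro ⟨⟨a, b⟩, hab, hif⟩
        by_cases hak : a = k
        · subst hak
          simp at hif
          subst hif
          exact Or.inr hab
        · simp [hak] at hif
    simp only [Prod.mk.injEq, true_and]
    exact PySem.List.sorted_eq_sorted_of_perm v _ (fun x => x) (fun _ _ h => h) hperm
  rw [List.map_congr_left hitem]
  show _ = (PySem.List.dedup (pvWords lrc_syllables path)).map _
  rw [← hkeys]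
  show d.items.map _ = (d.items.map (fun p => p.1)).map _
  rw [List.map_map]
  rfl
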